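-- pv_equiv track=rewrite | github.com/km1610/Leetcode-Solutions | #1255 Maximum Score Words Formed by Letters.py | cond
-- ===== SOURCE A (Python) =====
-- def cond(string,freq):
--     a = freq.copy()
--     for i in string:
--         if i not in a:
--             return False
--         a[i]-=1
--         if a[i]==-1:
--             return False
--     return True
-- ===== SOURCE B (Python) =====
-- def cond(string, freq):
--     need = {}
--     for ch in string:
--         need[ch] = need.get(ch, 0) + 1
--     for ch, k in need.items():
--         if ch not in freq or k > freq[ch]:
--             return False
--     return True
-- ===== Notes on version B (the rewrite author's own statement) =====
-- stated objective: alternative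
-- what changed: A copies the dict and decrements it per character with an early exit when a count hits -1; B builds a frequency counter of the string in one tally pass and then verifies each distinct character's need against the untouched freq dict.
-- intended difference: On inputs where every character of string is in freq with enough budget or a negative budget and at least one used character's budget is negative, A returns True (its decrement skips past the ==-1 test, so negative entries act as unlimited supply) while B returns False, the intended value since a negative budget supplies no letters. — e.g. on cond("a", [("a", -1)]): A returns true, B returns false
import Mathlib
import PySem

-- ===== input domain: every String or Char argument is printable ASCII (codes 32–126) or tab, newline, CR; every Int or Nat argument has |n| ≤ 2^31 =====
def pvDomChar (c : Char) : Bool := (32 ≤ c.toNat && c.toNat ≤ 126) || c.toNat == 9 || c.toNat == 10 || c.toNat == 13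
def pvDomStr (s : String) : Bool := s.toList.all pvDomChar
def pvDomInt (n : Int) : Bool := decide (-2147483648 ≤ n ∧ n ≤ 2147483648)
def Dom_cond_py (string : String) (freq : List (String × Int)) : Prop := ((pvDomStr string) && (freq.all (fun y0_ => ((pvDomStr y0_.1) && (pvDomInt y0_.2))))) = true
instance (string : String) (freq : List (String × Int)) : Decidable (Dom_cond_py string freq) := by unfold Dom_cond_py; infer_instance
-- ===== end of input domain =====

-- B replaces A's copy-and-decrement pass over the string with a tally pass (a frequency counter of the
-- string) followed by a verify pass over the distinct characters; outside D_ the return value is the same.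

-- a Python character (iteration over a str yields 1-char strings)
def pvStr1 (c : Char) : String := String.ofList [c]

-- ===== PORT A =====
def condALoop (a : PySem.Dict String Int) : List Char → Bool
  | [] => true
  | c :: rest =>
    if a.contains (pvStr1 c) = false then false
    else
      let a' := a.modify (pvStr1 c) 0 (fun v => v - 1)   -- a[i] -= 1
      if a'.getD (pvStr1 c) 0 = -1 then false
      else condALoop a' rest

def cond_py (string : String) (freq : List (String × Int)) : Bool :=
  condALoop (PySem.Dict.ofList freq) string.toList

-- ===== PORT B =====
def condBCheck (f : PySem.Dict String Int) : List (String × Int) → Bool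
  | [] => true
  | (ch, k) :: rest =>
    if f.contains ch = false then false                   -- 'ch not in freq'
    else if decide (f.getD ch 0 < k) then false           -- 'k > freq[ch]'
    else condBCheck f rest

def cond_py_alt (string : String) (freq : List (String × Int)) : Bool :=
  let need := string.toList.foldl
    (fun d c => d.insert (pvStr1 c) (d.getD (pvStr1 c) 0 + 1)) PySem.Dict.empty
  condBCheck (PySem.Dict.ofList freq) need.items

-- ===== PRECONDITION & SPEC =====
-- helpers for D_: A's acceptance rule per character, and presence of a negative budget
def pvAOk (d : PySem.Dict String Int) (cs : List Char) : Bool :=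
  cs.all (fun c => match d.get? (pvStr1 c) with
    | none => false
    | some v => decide (v < 0) || decide ((cs.count c : Int) ≤ v))

def pvHasNeg (d : PySem.Dict String Int) (cs : List Char) : Bool :=
  cs.any (fun c => match d.get? (pvStr1 c) with
    | none => false
    | some v => decide (v < 0))

-- On inputs where every character of string is in freq with enough budget or a negative budget and at
-- least one used character's budget is negative, A returns True (its decrement skips past the ==-1
-- test, so negative entries act as unlimited supply) while B returns False, the intended value since a
-- negative budget supplies no letters.
def D_cond_py (string : String) (freq : List (String × Int)) : Prop :=
  pvAOk (PySem.Dict.ofList freq) string.toList = true ∧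
  pvHasNeg (PySem.Dict.ofList freq) string.toList = true
instance (string : String) (freq : List (String × Int)) : Decidable (D_cond_py string freq) := by unfold D_cond_py; infer_instance

def Spec_cond_py (string : String) (freq : List (String × Int)) (out : Bool) : Prop := ¬ D_cond_py string freq → out = cond_py_alt string freq
instance (string : String) (freq : List (String × Int)) (out : Bool) : Decidable (Spec_cond_py string freq out) := by unfold Spec_cond_py; infer_instance

def pvDiffWitness_cond_py : String × (List (String × Int)) := ("a", [("a", -1)])
def pvDiffWitnessOut_cond_py : Bool × Bool := (true, false)

-- ===== CLAIM (what is proved, stated in full; the proofs are below) =====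
def Claim_unchanged_cond_py : Prop := ∀ (string : String) (freq : List (String × Int)), Dom_cond_py string freq → Spec_cond_py string freq (cond_py string freq)
def Claim_changed_cond_py : Prop := Dom_cond_py (pvDiffWitness_cond_py.1) (pvDiffWitness_cond_py.2) ∧ D_cond_py (pvDiffWitness_cond_py.1) (pvDiffWitness_cond_py.2) ∧ cond_py (pvDiffWitness_cond_py.1) (pvDiffWitness_cond_py.2) = pvDiffWitnessOut_cond_py.1 ∧ cond_py_alt (pvDiffWitness_cond_py.1) (pvDiffWitness_cond_py.2) = pvDiffWitnessOut_cond_py.2 ∧ pvDiffWitnessOut_cond_py.1 ≠ pvDiffWitnessOut_cond_py.2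
def Claim_exact_cond_py : Prop := ∀ (string : String) (freq : List (String × Int)), Dom_cond_py string freq → D_cond_py string freq → cond_py string freq ≠ cond_py_alt string freq

-- ===== LEMMAS AND PROOFS =====

-- the per-character admissibility checks the two ports implement
def pvChk (f : PySem.Dict String Int) (s : String) (n : Int) : Bool :=
  f.contains s && !(decide (0 ≤ f.getD s 0) && decide (f.getD s 0 < n))

def pvChkB (f : PySem.Dict String Int) (s : String) (n : Int) : Bool :=
  f.contains s && decide (n ≤ f.getD s 0)

lemma pvStr1_inj : Function.Injective pvStr1 := by
  intro a b h
  have := congrArg String.toList h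
  simpa [pvStr1] using this

lemma pv_decide_shift (v n : Int) (hv : v ≠ 0) :
    (decide (0 ≤ v - 1) && decide (v - 1 < n)) = (decide (0 ≤ v) && decide (v < n + 1)) := by
  rw [Bool.eq_iff_iff]
  simp only [Bool.and_eq_true, decide_eq_true_eq]
  omega

lemma pv_all_congr {α : Type} {l : List α} {p q : α → Bool}
    (h : ∀ x ∈ l, p x = q x) : l.all p = l.all q := by
  induction l with
  | nil => rfl
  | cons x xs ih =>
    simp only [List.all_cons, h x (by simp), ih (fun y hy => h y (by simp [hy]))]

lemma pv_all_ofList (l : List String) (p : String → Bool) :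
    (PySem.Set.ofList l).all p = l.all p := by
  rw [Bool.eq_iff_iff]
  simp only [List.all_eq_true]
  constructor <;> intro h x hx
  · exact h x (by simpa [PySem.Set.mem_ofList] using hx)
  · exact h x (by simpa [PySem.Set.mem_ofList] using hx)

lemma condBCheck_eq_all (f : PySem.Dict String Int) (items : List (String × Int)) :
    condBCheck f items = items.all (fun p => pvChkB f p.1 p.2) := by
  induction items with
  | nil => rfl
  | cons p rest ih =>
    obtain ⟨ch, k⟩ := p
    by_cases hc : f.contains ch = true
    · by_cases h1 : f.getD ch 0 < k
      · simp only [condBCheck, hc, Bool.true_eq_false, if_false, if_pos (decide_eq_true h1),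
          List.all_cons, pvChkB]
        simp [not_le.mpr h1]
      · have : decide (f.getD ch 0 < k) = false := decide_eq_false h1
        simp only [condBCheck, hc, Bool.true_eq_false, if_false, this, Bool.false_eq_true,
          if_false, ih, List.all_cons, pvChkB]
        simp [not_lt.mp h1]
    · simp only [Bool.not_eq_true] at hc
      simp [condBCheck, hc, pvChkB]

lemma condALoop_eq_all : ∀ (cs : List Char) (a : PySem.Dict String Int),
    condALoop a cs = cs.all (fun c => pvChk a (pvStr1 c) ((cs.count c : Int))) := by
  intro cs
  induction cs with
  | nil => intro a; rfl
  | cons c rest ih =>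
    intro a
    by_cases hc : a.contains (pvStr1 c) = true
    · have hmod : (a.modify (pvStr1 c) 0 (fun v => v - 1)).getD (pvStr1 c) 0 = a.getD (pvStr1 c) 0 - 1 :=
        PySem.Dict.getD_modify_self a (pvStr1 c) 0 (fun v => v - 1)
      by_cases hv : a.getD (pvStr1 c) 0 = 0
      · -- the decrement hits -1 on the first occurrence of c : both sides are false
        simp only [condALoop, hc, Bool.true_eq_false, if_false, hmod, hv]
        simp [pvChk, hc, hv]
      · -- no failure at this step : use the IH on the modified dict
        have hne : a.getD (pvStr1 c) 0 - 1 ≠ -1 := by omega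
        simp only [condALoop, hc, Bool.true_eq_false, if_false, hmod, if_neg hne]
        rw [ih]
        have hcong : rest.all (fun c' => pvChk (a.modify (pvStr1 c) 0 (fun v => v - 1)) (pvStr1 c') ((rest.count c' : Int)))
            = rest.all (fun c' => pvChk a (pvStr1 c') (((c :: rest).count c' : Int))) := by
          apply pv_all_congr
          intro c' _
          by_cases hcc : c' = c
          · subst hcc
            simp only [pvChk, PySem.Dict.contains_modify, hmod, List.count_cons_self,
              beq_self_eq_true, Bool.true_or, hc, Bool.true_and]
            rw [pv_decide_shift _ _ hv]
            push_cast
            ring_nf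
          · have hs : pvStr1 c' ≠ pvStr1 c := fun h => hcc (pvStr1_inj h)
            have hbe : (pvStr1 c' == pvStr1 c) = false := beq_eq_false_iff_ne.mpr hs
            simp only [pvChk, PySem.Dict.contains_modify, hbe, Bool.false_or,
              PySem.Dict.getD_modify_of_ne a 0 (fun v => v - 1) hs, List.count_cons_of_ne (Ne.symm hcc)]
        rw [hcong]
        -- absorb the head check : if it is false, the c-element inside rest fails too
        by_cases hh : pvChk a (pvStr1 c) (((c :: rest).count c : Int)) = true
        · rw [List.all_cons, hh, Bool.true_and]
        · simp only [Bool.not_eq_true] at hh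
          have hh' := hh
          simp only [pvChk, hc, Bool.true_and, Bool.not_eq_false', Bool.and_eq_true,
            decide_eq_true_eq, List.count_cons_self] at hh'
          push_cast at hh'
          have hpos : 0 < rest.count c := by omega
          have hcm : c ∈ rest := List.count_pos_iff.mp hpos
          have hh2 : pvChk a (pvStr1 c) ((rest.count c : Int) + 1) = false := by
            rw [show ((rest.count c : Int) + 1) = ((List.count c (c :: rest) : Int)) from by
              rw [List.count_cons_self]; push_cast; ring]
            exact hh
          have hfalse : rest.all (fun c' => pvChk a (pvStr1 c') (((c :: rest).count c' : Int))) = false :=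
            List.all_eq_false.mpr ⟨c, hcm, by simp [hh2]⟩
          simp only [List.all_cons, hh, hfalse, Bool.false_and]
    · simp only [Bool.not_eq_true] at hc
      simp [condALoop, hc, pvChk]

lemma cond_py_alt_eq_all (string : String) (freq : List (String × Int)) :
    cond_py_alt string freq
      = string.toList.all (fun c =>
          pvChkB (PySem.Dict.ofList freq) (pvStr1 c) ((string.toList.count c : Int))) := by
  unfold cond_py_alt
  set cs := string.toList
  rw [show (cs.foldl (fun d c => d.insert (pvStr1 c) (d.getD (pvStr1 c) 0 + 1)) PySem.Dict.empty)
        = PySem.Dict.counter (cs.map pvStr1) from by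
      rw [← PySem.Dict.foldl_insert_getD_add_one_eq_counter, List.foldl_map]]
  rw [condBCheck_eq_all, PySem.Dict.items_counter, List.all_map, pv_all_ofList, List.all_map]
  apply pv_all_congr
  intro c _
  simp only [Function.comp]
  rw [List.count_map_of_injective cs pvStr1 pvStr1_inj c]

-- get?/contains/getD bookkeeping
lemma pv_get?_some {d : PySem.Dict String Int} {s : String} {v : Int}
    (h : d.get? s = some v) : d.contains s = true ∧ d.getD s 0 = v := by
  constructor
  · rw [PySem.Dict.contains_eq_isSome_get?, h]; rfl
  · rw [PySem.Dict.getD_eq_get?_getD, h]; rfl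

lemma pv_get?_none {d : PySem.Dict String Int} {s : String}
    (h : d.get? s = none) : d.contains s = false := by
  rw [PySem.Dict.contains_eq_isSome_get?, h]; rfl

-- ===== VERDICT (by name: the statements are the Claim_ definitions above) =====
theorem cond_py_spec : Claim_unchanged_cond_py := by
  intro string freq _ hnd
  unfold cond_py
  rw [condALoop_eq_all, cond_py_alt_eq_all]
  set cs := string.toList
  set d := PySem.Dict.ofList freq
  by_cases hok : pvAOk d cs = true
  · -- then ¬ pvHasNeg, so no used character has a negative budget and the checks coincide
    have hng : pvHasNeg d cs = false := by
      cases h : pvHasNeg d cs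
      · rfl
      · exact absurd ⟨hok, h⟩ hnd
    unfold pvHasNeg at hng
    have hng' : ∀ x ∈ cs, (match d.get? (pvStr1 x) with
        | none => false
        | some v => decide (v < 0)) = false := by
      intro x hx
      cases h : (match d.get? (pvStr1 x) with | none => false | some v => decide (v < 0)) with
      | false => rfl
      | true =>
        have hT : (cs.any fun c => match d.get? (pvStr1 c) with
            | none => false
            | some v => decide (v < 0)) = true := List.any_eq_true.mpr ⟨x, hx, h⟩
        rw [hT] at hng
        cases hng
    apply pv_all_congr
    intro c hcm
    have hok' := (List.all_eq_true.mp hok) c hcm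
    cases hd : d.get? (pvStr1 c) with
    | none => rw [hd] at hok'; simp at hok'
    | some v =>
      obtain ⟨hc, hg⟩ := pv_get?_some hd
      have hvn : ¬ v < 0 := by
        have h := hng' c hcm
        rw [hd] at h
        simpa using h
      simp only [pvChk, pvChkB, hc, hg, Bool.true_and]
      have h1 : decide (0 ≤ v) = true := decide_eq_true (by omega)
      by_cases hk : ((cs.count c : Int)) ≤ v
      · rw [h1, decide_eq_false (show ¬ v < ((cs.count c : Int)) by omega),
            decide_eq_true hk]
        rfl
      · rw [h1, decide_eq_true (show v < ((cs.count c : Int)) by omega),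
            decide_eq_false hk]
        rfl
  · -- some character fails A's own rule : both sides are false
    simp only [pvAOk, List.all_eq_true, not_forall] at hok
    obtain ⟨c, hcm, hfail⟩ := hok
    cases hd : d.get? (pvStr1 c) with
    | none =>
      have hc := pv_get?_none hd
      rw [List.all_eq_false.mpr ⟨c, hcm, by simp [pvChk, hc]⟩,
          List.all_eq_false.mpr ⟨c, hcm, by simp [pvChkB, hc]⟩]
    | some v =>
      obtain ⟨hc, hg⟩ := pv_get?_some hd
      rw [hd] at hfail
      simp only [Bool.or_eq_true, decide_eq_true_eq, not_or, not_lt, not_le] at hfail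
      have hA : pvChk d (pvStr1 c) ((cs.count c : Int)) = false := by
        simp only [pvChk, hc, hg, Bool.true_and]
        rw [decide_eq_true (show (0:Int) ≤ v by omega),
            decide_eq_true (show v < ((cs.count c : Int)) by omega)]
        rfl
      have hB : pvChkB d (pvStr1 c) ((cs.count c : Int)) = false := by
        simp only [pvChkB, hc, hg, Bool.true_and, decide_eq_false_iff_not]
        omega
      rw [List.all_eq_false.mpr ⟨c, hcm, by simp [hA]⟩,
          List.all_eq_false.mpr ⟨c, hcm, by simp [hB]⟩]

theorem cond_py_changed : Claim_changed_cond_py := by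
  unfold Claim_changed_cond_py; decide

theorem cond_py_tight : Claim_exact_cond_py := by
  intro string freq _ hd
  obtain ⟨hok, hng⟩ := hd
  unfold cond_py
  rw [condALoop_eq_all, cond_py_alt_eq_all]
  set cs := string.toList
  set d := PySem.Dict.ofList freq
  -- A is true : every character passes A's rule
  have hA : cs.all (fun c => pvChk d (pvStr1 c) ((cs.count c : Int))) = true := by
    apply List.all_eq_true.mpr
    intro c hcm
    have hok' := (List.all_eq_true.mp hok) c hcm
    cases hdd : d.get? (pvStr1 c) with
    | none => rw [hdd] at hok'; simp at hok'
    | some v =>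
      obtain ⟨hc, hg⟩ := pv_get?_some hdd
      rw [hdd] at hok'
      simp only [Bool.or_eq_true, decide_eq_true_eq] at hok'
      simp only [pvChk, hc, hg, Bool.true_and]
      rcases hok' with hneg | hle
      · simp [decide_eq_false (show ¬ (0:Int) ≤ v by omega)]
      · simp [decide_eq_false (show ¬ v < ((cs.count c : Int)) by omega)]
  -- B is false : the negative-budget character cannot cover even one occurrence
  have hB : cs.all (fun c => pvChkB d (pvStr1 c) ((cs.count c : Int))) = false := by
    unfold pvHasNeg at hng
    obtain ⟨c, hcm, hneg⟩ := List.any_eq_true.mp hng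
    cases hdd : d.get? (pvStr1 c) with
    | none => rw [hdd] at hneg; simp at hneg
    | some v =>
      obtain ⟨hc, hg⟩ := pv_get?_some hdd
      rw [hdd] at hneg
      simp only [decide_eq_true_eq] at hneg
      have hpos : 0 < cs.count c := List.count_pos_iff.mpr hcm
      apply List.all_eq_false.mpr
      refine ⟨c, hcm, ?_⟩
      simp only [pvChkB, hc, hg, Bool.true_and, Bool.not_eq_true, decide_eq_false_iff_not, not_le]
      omega
  rw [hA, hB]
  simp
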